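-- pv_equiv track=rewrite | github.com/Blockmen3000/Roboterarm | QR_GUI_QR.py | suche_max_koordinaten
-- ===== SOURCE A (Python) =====
-- def suche_max_koordinaten(strichliste):
--     x_max=0
--     y_max=0
--
--     for strich in strichliste:
--         start_x,start_y = strich[0]
--         if strich[0][0] > x_max:
--             x_max=strich[0][0]
--         if strich[0][1] > y_max:
--             y_max=strich[0][1]
--         for punkt in strich[1:]:
--             start_x+= punkt[0]
--             start_y+= punkt[1]
--             if start_x > x_max:
--                 x_max = start_x
--             if start_y > y_max:
--                 y_max = start_y
--     return (x_max,y_max)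
-- ===== SOURCE B (Python) =====
-- def suche_max_koordinaten(strichliste):
--     # Max-prefix-sum via the right-to-left Kadane-style recurrence
--     # f(p :: r) = p + max(0, f(r)): no running prefix sums are ever formed.
--     x_max = 0
--     y_max = 0
--     for strich in strichliste:
--         fx = 0
--         fy = 0
--         for px, py in reversed(strich):
--             fx = px + (fx if fx > 0 else 0)
--             fy = py + (fy if fy > 0 else 0)
--         x_max = max(x_max, fx)
--         y_max = max(y_max, fy)
--     return (x_max, y_max)
-- ===== Notes on version B (the rewrite author's own statement) =====
-- stated objective: alternative
-- what changed: B never forms the running prefix sums A maintains: it scans each stroke right-to-left with the Kadane-style recurrence f = p + max(0, f) whose final value equals the stroke's maximum prefix sum, then takes the max of these per-stroke values seeded with 0.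
-- crash fix: On any input containing an empty stroke A raises IndexError at strich[0]; B's reversed-scan contributes the neutral value 0 for that stroke and returns the max over the remaining strokes. — e.g. on suche_max_koordinaten([[]]): A raises IndexError, B returns (0, 0)
import Mathlib
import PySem

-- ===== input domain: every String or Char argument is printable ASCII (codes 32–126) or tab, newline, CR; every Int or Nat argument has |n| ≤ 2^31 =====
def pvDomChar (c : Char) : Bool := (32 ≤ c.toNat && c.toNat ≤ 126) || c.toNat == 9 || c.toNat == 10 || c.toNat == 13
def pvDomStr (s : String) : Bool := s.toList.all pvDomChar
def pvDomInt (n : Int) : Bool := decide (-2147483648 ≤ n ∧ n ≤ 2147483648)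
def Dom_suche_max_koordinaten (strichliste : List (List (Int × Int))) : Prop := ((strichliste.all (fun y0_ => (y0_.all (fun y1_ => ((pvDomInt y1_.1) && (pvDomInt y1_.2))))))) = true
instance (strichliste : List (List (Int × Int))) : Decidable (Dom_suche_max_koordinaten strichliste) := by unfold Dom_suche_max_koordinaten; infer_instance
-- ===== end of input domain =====

-- B replaces A's forward running prefix sums and interleaved max guards by a
-- right-to-left Kadane-style recurrence per stroke (alternative algorithm, same cost).

-- ===== PORT A =====
-- literal transliteration of A: outer loop over strokes; first point handled
-- separately (strich[0]), then inner loop over strich[1:] with running sums and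
-- in-place if-guard max updates.
def suche_max_koordinaten (strichliste : List (List (Int × Int))) : Int × Int :=
  strichliste.foldl
    (fun (m : Int × Int) strich =>
      match strich with
      | [] => m  -- Python raises IndexError at strich[0] here; excluded by Pre_
      | (sx, sy) :: rest =>
        let xm := if sx > m.1 then sx else m.1
        let ym := if sy > m.2 then sy else m.2
        let r := rest.foldl
          (fun (s : Int × Int × Int × Int) (punkt : Int × Int) =>
            let nx := s.1 + punkt.1
            let ny := s.2.1 + punkt.2
            let xm' := if nx > s.2.2.1 then nx else s.2.2.1
            let ym' := if ny > s.2.2.2 then ny else s.2.2.2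
            (nx, ny, xm', ym'))
          (sx, sy, xm, ym)
        (r.2.2.1, r.2.2.2))
    (0, 0)

-- ===== PORT B =====
-- literal transliteration of Source B: for each stroke, scan it in reverse
-- (reversed(strich) → strich.reverse) with state (fx, fy) updated by
-- fx = px + (fx if fx > 0 else 0); then x_max = max(x_max, fx), same for y.
def suche_max_koordinaten_alt (strichliste : List (List (Int × Int))) : Int × Int :=
  strichliste.foldl
    (fun (m : Int × Int) strich =>
      let f := strich.reverse.foldl
        (fun (f : Int × Int) (p : Int × Int) =>
          (p.1 + (if f.1 > 0 then f.1 else 0),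
           p.2 + (if f.2 > 0 then f.2 else 0)))
        (0, 0)
      (max m.1 f.1, max m.2 f.2))
    (0, 0)

-- ===== PRECONDITION & SPEC =====
-- Pre_ excludes inputs with an empty stroke: there A raises IndexError at strich[0].
def Pre_suche_max_koordinaten (strichliste : List (List (Int × Int))) : Prop :=
  ∀ strich ∈ strichliste, strich ≠ []
instance (strichliste : List (List (Int × Int))) : Decidable (Pre_suche_max_koordinaten strichliste) := by unfold Pre_suche_max_koordinaten; infer_instance

def pvWitness_suche_max_koordinaten : (List (List (Int × Int))) := [[(1, 2), (3, -4)], [(-1, 5)]]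

-- On any input containing an empty stroke A raises IndexError at strich[0]; B returns the max over the remaining strokes.
def Raises_suche_max_koordinaten (strichliste : List (List (Int × Int))) : Prop :=
  ∃ strich ∈ strichliste, strich = []
instance (strichliste : List (List (Int × Int))) : Decidable (Raises_suche_max_koordinaten strichliste) := by unfold Raises_suche_max_koordinaten; infer_instance
def pvRaiseWitness_suche_max_koordinaten : (List (List (Int × Int))) := [[]]
def pvRaiseWitnessOut_suche_max_koordinaten : Int × Int := (0, 0)

def Spec_suche_max_koordinaten (strichliste : List (List (Int × Int))) (out : Int × Int) : Prop := out = suche_max_koordinaten_alt strichliste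
instance (strichliste : List (List (Int × Int))) (out : Int × Int) : Decidable (Spec_suche_max_koordinaten strichliste out) := by unfold Spec_suche_max_koordinaten; infer_instance

-- ===== CLAIM (what is proved, stated in full; the proofs are below) =====
def Claim_equal_suche_max_koordinaten : Prop := ∀ (strichliste : List (List (Int × Int))), Dom_suche_max_koordinaten strichliste → Pre_suche_max_koordinaten strichliste → Spec_suche_max_koordinaten strichliste (suche_max_koordinaten strichliste)
def Claim_raises_suche_max_koordinaten : Prop := (∀ (strichliste : List (List (Int × Int))), Dom_suche_max_koordinaten strichliste → Raises_suche_max_koordinaten strichliste → ¬ Pre_suche_max_koordinaten strichliste) ∧ (Dom_suche_max_koordinaten (pvRaiseWitness_suche_max_koordinaten) ∧ Raises_suche_max_koordinaten (pvRaiseWitness_suche_max_koordinaten) ∧ suche_max_koordinaten_alt (pvRaiseWitness_suche_max_koordinaten) = pvRaiseWitnessOut_suche_max_koordinaten)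

-- ===== LEMMAS AND PROOFS =====

-- prefix sums of the x- (resp. y-) coordinates of a point list, starting from t
def prefX (t : Int) : List (Int × Int) → List Int
  | [] => []
  | p :: r => (t + p.1) :: prefX (t + p.1) r
def prefY (t : Int) : List (Int × Int) → List Int
  | [] => []
  | p :: r => (t + p.2) :: prefY (t + p.2) r

-- the sum of all x- (resp. y-) deltas
def sumX (l : List (Int × Int)) : Int := (l.map (·.1)).sum
def sumY (l : List (Int × Int)) : Int := (l.map (·.2)).sum

-- the Kadane-style right-to-left recurrence that B computes
def gX : List (Int × Int) → Int
  | [] => 0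
  | p :: r => p.1 + max 0 (gX r)
def gY : List (Int × Int) → Int
  | [] => 0
  | p :: r => p.2 + max 0 (gY r)

lemma pv_guard_eq_max (a b : Int) : (if b > a then b else a) = max a b := by
  split_ifs with h <;> omega

lemma pv_a_inner (l : List (Int × Int)) (sx sy xm ym : Int) :
    l.foldl
      (fun (s : Int × Int × Int × Int) (punkt : Int × Int) =>
        let nx := s.1 + punkt.1
        let ny := s.2.1 + punkt.2
        let xm' := if nx > s.2.2.1 then nx else s.2.2.1
        let ym' := if ny > s.2.2.2 then ny else s.2.2.2
        (nx, ny, xm', ym'))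
      (sx, sy, xm, ym)
    = (sx + sumX l, sy + sumY l,
       (prefX sx l).foldl max xm, (prefY sy l).foldl max ym) := by
  induction l generalizing sx sy xm ym with
  | nil => simp [sumX, sumY, prefX, prefY]
  | cons p r ih =>
    simp only [List.foldl_cons, prefX, prefY, sumX, sumY, List.map_cons, List.sum_cons]
    rw [ih]
    simp [sumX, sumY, pv_guard_eq_max]
    constructor <;> ring

-- B's reversed inner scan computes exactly (gX strich, gY strich)
lemma pv_b_inner (l : List (Int × Int)) :
    l.reverse.foldl
      (fun (f : Int × Int) (p : Int × Int) =>
        (p.1 + (if f.1 > 0 then f.1 else 0),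
         p.2 + (if f.2 > 0 then f.2 else 0)))
      (0, 0)
    = (gX l, gY l) := by
  rw [List.foldl_reverse]
  induction l with
  | nil => simp [gX, gY]
  | cons p r ih =>
    simp only [List.foldr_cons]
    rw [ih]
    simp only [gX, gY, pv_guard_eq_max]

-- folding max over the prefix sums of a nonempty stroke is one max with gX/gY
lemma pv_pref_gX (l : List (Int × Int)) (hl : l ≠ []) (t xm : Int) :
    (prefX t l).foldl max xm = max xm (t + gX l) := by
  induction l generalizing t xm with
  | nil => exact absurd rfl hl
  | cons p r ih =>
    simp only [prefX, List.foldl_cons, gX]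
    cases r with
    | nil => simp [prefX, gX]
    | cons q s =>
      rw [ih (by simp) (t + p.1) (max xm (t + p.1))]
      omega
lemma pv_pref_gY (l : List (Int × Int)) (hl : l ≠ []) (t ym : Int) :
    (prefY t l).foldl max ym = max ym (t + gY l) := by
  induction l generalizing t ym with
  | nil => exact absurd rfl hl
  | cons p r ih =>
    simp only [prefY, List.foldl_cons, gY]
    cases r with
    | nil => simp [prefY, gY]
    | cons q s =>
      rw [ih (by simp) (t + p.2) (max ym (t + p.2))]
      omega

-- the two outer folds agree (all strokes nonempty), from any accumulator
lemma pv_fold_eq (sl : List (List (Int × Int))) (h : ∀ s ∈ sl, s ≠ []) (xm ym : Int) :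
    sl.foldl
      (fun (m : Int × Int) strich =>
        match strich with
        | [] => m
        | (sx, sy) :: rest =>
          let xm := if sx > m.1 then sx else m.1
          let ym := if sy > m.2 then sy else m.2
          let r := rest.foldl
            (fun (s : Int × Int × Int × Int) (punkt : Int × Int) =>
              let nx := s.1 + punkt.1
              let ny := s.2.1 + punkt.2
              let xm' := if nx > s.2.2.1 then nx else s.2.2.1
              let ym' := if ny > s.2.2.2 then ny else s.2.2.2
              (nx, ny, xm', ym'))
            (sx, sy, xm, ym)
          (r.2.2.1, r.2.2.2))
      (xm, ym)
    = sl.foldl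
        (fun (m : Int × Int) strich =>
          let f := strich.reverse.foldl
            (fun (f : Int × Int) (p : Int × Int) =>
              (p.1 + (if f.1 > 0 then f.1 else 0),
               p.2 + (if f.2 > 0 then f.2 else 0)))
            (0, 0)
          (max m.1 f.1, max m.2 f.2))
        (xm, ym) := by
  induction sl generalizing xm ym with
  | nil => rfl
  | cons s t ih =>
    have hs : s ≠ [] := h s (by simp)
    obtain ⟨p, rest, rfl⟩ := List.exists_cons_of_ne_nil hs
    obtain ⟨px, py⟩ := p
    simp only [List.foldl_cons]
    rw [pv_a_inner, pv_b_inner]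
    simp only
    rw [ih (fun x hx => h x (List.mem_cons_of_mem _ hx))]
    congr 1
    by_cases hr : rest = []
    · subst hr
      simp [prefX, prefY, gX, gY, pv_guard_eq_max]
    · rw [pv_pref_gX rest hr, pv_pref_gY rest hr]
      simp only [gX, gY, pv_guard_eq_max, Prod.mk.injEq]
      refine ⟨?_, ?_⟩ <;> omega

-- ===== VERDICT (by name: the statement is the Claim_ definition above) =====
theorem suche_max_koordinaten_spec : Claim_equal_suche_max_koordinaten := by
  intro sl _ hpre
  unfold Spec_suche_max_koordinaten suche_max_koordinaten suche_max_koordinaten_alt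
  exact pv_fold_eq sl hpre 0 0

@[simp] theorem suche_max_koordinaten_raises : Claim_raises_suche_max_koordinaten := by
  unfold Claim_raises_suche_max_koordinaten
  refine ⟨?_, by decide⟩
  intro sl _ hr hpre
  obtain ⟨s, hs, hseq⟩ := hr
  subst hseq
  exact hpre _ hs rfl
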